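-- pv_equiv track=rewrite | github.com/Damiru2112/PairsTradingStratMain | dashboard_jp.py | get_pair_blocking_status
-- ===== SOURCE A (Python) =====
-- def get_pair_blocking_status(pair, raw_issues):
--     for issue in raw_issues:
--         if issue.get("severity") == "red":
--             if issue.get("type") == "system":
--                 return True, "System"
--             if issue.get("type") == "data":
--                 return True, "Data"
--     for issue in raw_issues:
--         if issue.get("pair") == pair and issue.get("type") == "risk" and issue.get("severity") == "red":
--             return True, "Risk"
--     return False, None
-- ===== SOURCE B (Python) =====
-- def get_pair_blocking_status(pair, raw_issues):
--     risk_hit = False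
--     for issue in raw_issues:
--         if issue.get("severity") == "red":
--             t = issue.get("type")
--             if t == "system":
--                 return True, "System"
--             if t == "data":
--                 return True, "Data"
--             if not risk_hit and t == "risk" and issue.get("pair") == pair:
--                 risk_hit = True
--     if risk_hit:
--         return True, "Risk"
--     return False, None
-- ===== Notes on version B (the rewrite author's own statement) =====
-- stated objective: alternative
-- what changed: Merges A's two sequential scans into a single pass that remembers a pending red risk hit for this pair and returns it only after confirming no red system/data issue exists.
import Mathlib
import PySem

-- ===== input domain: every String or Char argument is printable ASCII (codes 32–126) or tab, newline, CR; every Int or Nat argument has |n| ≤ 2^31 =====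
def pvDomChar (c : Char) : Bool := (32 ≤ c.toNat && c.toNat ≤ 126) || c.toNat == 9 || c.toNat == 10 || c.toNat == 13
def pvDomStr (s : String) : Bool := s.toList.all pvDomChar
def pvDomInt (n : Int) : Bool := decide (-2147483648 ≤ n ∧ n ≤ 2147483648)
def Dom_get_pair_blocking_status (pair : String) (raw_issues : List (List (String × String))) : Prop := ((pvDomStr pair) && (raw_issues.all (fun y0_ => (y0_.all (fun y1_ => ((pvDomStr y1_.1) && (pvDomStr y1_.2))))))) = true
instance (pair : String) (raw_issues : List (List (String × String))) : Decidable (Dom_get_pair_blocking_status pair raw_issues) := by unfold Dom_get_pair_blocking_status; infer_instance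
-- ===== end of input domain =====

-- B merges A's two sequential scans into one pass (same return value; a single-pass alternative to the two scans).

-- shared helper: Python dict.get(k) on the association list (first match)
def pvGetKey (issue : List (String × String)) (k : String) : Option String :=
  PySem.Dict.get? (PySem.Dict.mk issue) k

-- ===== PORT A =====
-- first loop of A: first red issue of type system/data decides
def pvLoopA1 : List (List (String × String)) → Option (Bool × Option String)
  | [] => none
  | issue :: rest =>
    if pvGetKey issue "severity" = some "red" then
      if pvGetKey issue "type" = some "system" then some (true, some "System")
      else if pvGetKey issue "type" = some "data" then some (true, some "Data")
      else pvLoopA1 rest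
    else pvLoopA1 rest

-- second loop of A: first red risk issue for this pair
def pvLoopA2 (pair : String) : List (List (String × String)) → Option (Bool × Option String)
  | [] => none
  | issue :: rest =>
    if pvGetKey issue "pair" = some pair ∧ pvGetKey issue "type" = some "risk" ∧
        pvGetKey issue "severity" = some "red" then
      some (true, some "Risk")
    else pvLoopA2 pair rest

def get_pair_blocking_status (pair : String) (raw_issues : List (List (String × String))) : Bool × Option String :=
  match pvLoopA1 raw_issues with
  | some r => r
  | none =>
    match pvLoopA2 pair raw_issues with
    | some r => r
    | none => (false, none)

-- ===== PORT B =====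
-- single pass, carrying whether a red risk issue for this pair was already seen
def pvLoopB (pair : String) (risk_hit : Bool) : List (List (String × String)) → Bool × Option String
  | [] => if risk_hit then (true, some "Risk") else (false, none)
  | issue :: rest =>
    if pvGetKey issue "severity" = some "red" then
      let t := pvGetKey issue "type"
      if t = some "system" then (true, some "System")
      else if t = some "data" then (true, some "Data")
      else
        let risk_hit' :=
          if ¬ risk_hit = true ∧ t = some "risk" ∧ pvGetKey issue "pair" = some pair then true
          else risk_hit
        pvLoopB pair risk_hit' rest
    else pvLoopB pair risk_hit rest

def get_pair_blocking_status_alt (pair : String) (raw_issues : List (List (String × String))) : Bool × Option String :=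
  pvLoopB pair false raw_issues

-- ===== PRECONDITION & SPEC =====
def Spec_get_pair_blocking_status (pair : String) (raw_issues : List (List (String × String))) (out : Bool × Option String) : Prop := out = get_pair_blocking_status_alt pair raw_issues
instance (pair : String) (raw_issues : List (List (String × String))) (out : Bool × Option String) : Decidable (Spec_get_pair_blocking_status pair raw_issues out) := by unfold Spec_get_pair_blocking_status; infer_instance

-- ===== CLAIM (what is proved, stated in full; the proofs are below) =====
def Claim_equal_get_pair_blocking_status : Prop := ∀ (pair : String) (raw_issues : List (List (String × String))), Dom_get_pair_blocking_status pair raw_issues → Spec_get_pair_blocking_status pair raw_issues (get_pair_blocking_status pair raw_issues)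

-- ===== LEMMAS AND PROOFS =====

-- whether some red risk issue for this pair occurs
def pvHasRisk (pair : String) (xs : List (List (String × String))) : Bool :=
  xs.any (fun issue =>
    decide (pvGetKey issue "pair" = some pair) &&
    decide (pvGetKey issue "type" = some "risk") &&
    decide (pvGetKey issue "severity" = some "red"))

theorem pvLoopA2_eq (pair : String) (xs : List (List (String × String))) :
    pvLoopA2 pair xs = if pvHasRisk pair xs then some (true, some "Risk") else none := by
  induction xs with
  | nil => rfl
  | cons issue rest ih =>
    simp only [pvLoopA2, pvHasRisk, List.any_cons] at *
    by_cases h1 : pvGetKey issue "pair" = some pair <;>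
      by_cases h2 : pvGetKey issue "type" = some "risk" <;>
      by_cases h3 : pvGetKey issue "severity" = some "red" <;>
      simp [h1, h2, h3, ih]

theorem pvLoopB_eq (pair : String) (xs : List (List (String × String))) (rh : Bool) :
    pvLoopB pair rh xs =
      match pvLoopA1 xs with
      | some r => r
      | none => if rh || pvHasRisk pair xs then (true, some "Risk") else (false, none) := by
  induction xs generalizing rh with
  | nil => cases rh <;> rfl
  | cons issue rest ih =>
    by_cases hs : pvGetKey issue "severity" = some "red"
    · by_cases h1 : pvGetKey issue "type" = some "system"
      · simp [pvLoopB, pvLoopA1, hs, h1]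
      · by_cases h2 : pvGetKey issue "type" = some "data"
        · simp [pvLoopB, pvLoopA1, hs, h1, h2]
        · by_cases hc : pvGetKey issue "type" = some "risk" ∧ pvGetKey issue "pair" = some pair
          · cases rh <;>
              simp [pvLoopB, pvLoopA1, hs, h1, h2, hc.1, hc.2, ih, pvHasRisk]
          · have hc' : ¬ (pvGetKey issue "pair" = some pair ∧ pvGetKey issue "type" = some "risk") :=
              fun h => hc ⟨h.2, h.1⟩
            cases rh <;>
              simp [pvLoopB, pvLoopA1, hs, h1, h2, hc, hc', ih, pvHasRisk]
    · simp [pvLoopB, pvLoopA1, hs, ih, pvHasRisk]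

-- ===== VERDICT (by name: the statement is the Claim_ definition above) =====
theorem get_pair_blocking_status_spec : Claim_equal_get_pair_blocking_status := by
  intro pair raw_issues _
  unfold Spec_get_pair_blocking_status get_pair_blocking_status get_pair_blocking_status_alt
  rw [pvLoopB_eq, pvLoopA2_eq]
  cases h : pvLoopA1 raw_issues <;> cases hr : pvHasRisk pair raw_issues <;> simp
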